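-- pv_equiv track=rewrite | github.com/hjwnu/Algorithm | 프로그래머스/1/12982. 예산/예산.py | solution
-- ===== SOURCE A (Python) =====
-- def solution(d, budget):
--     origin = len(d)
--     for i in sorted(d):
--         if budget - i < 0 :
--             break
--         budget -= i
--         d.remove(i)
--     return origin - len(d)
-- ===== SOURCE B (Python) =====
-- def solution(d, budget):
--     # Sort once, accumulate a running prefix sum, count fitting prefix items.
--     # Return-value equivalent to A; note A also mutates d in place, B does not.
--     total = 0
--     cnt = 0
--     for x in sorted(d):
--         total += x
--         if total > budget:
--             break
--         cnt += 1
--     return cnt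
-- ===== Notes on version B (the rewrite author's own statement) =====
-- stated objective: faster
-- what changed: B sorts once and counts the longest prefix whose running sum fits the budget, removing A's O(n) list.remove inside the loop (and A's in-place mutation of d).
import Mathlib
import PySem

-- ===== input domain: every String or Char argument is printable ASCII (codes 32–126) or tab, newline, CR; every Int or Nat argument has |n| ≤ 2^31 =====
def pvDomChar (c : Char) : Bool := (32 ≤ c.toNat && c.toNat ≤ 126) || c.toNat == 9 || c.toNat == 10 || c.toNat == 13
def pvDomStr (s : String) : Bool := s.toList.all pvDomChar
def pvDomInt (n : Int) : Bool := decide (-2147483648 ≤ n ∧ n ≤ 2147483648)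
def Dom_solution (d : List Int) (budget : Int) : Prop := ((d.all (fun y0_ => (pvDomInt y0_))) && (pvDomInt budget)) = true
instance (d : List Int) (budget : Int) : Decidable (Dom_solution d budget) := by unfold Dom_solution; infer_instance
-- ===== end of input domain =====

-- B sorts once and counts the longest prefix whose running sum fits the budget (no list.remove,
-- no mutation of d; equivalence is about the RETURN value — A mutates its argument, B does not).

-- ===== PORT A =====
-- one loop step of A: state = (budget, d, stopped); d.remove(i) always succeeds in A
-- (i is drawn from a sorted snapshot of d), so the getD fallback is never taken.
def solStepA (s : Int × List Int × Bool) (i : Int) : Int × List Int × Bool :=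
  match s with
  | (b, ds, stopped) =>
    if stopped then (b, ds, true)
    else if b - i < 0 then (b, ds, true)
    else (b - i, (PySem.List.remove? ds i).getD ds, false)

def solution (d : List Int) (budget : Int) : Int :=
  let origin : Int := d.length
  let st := (PySem.List.sorted d (fun x => x) false).foldl solStepA (budget, d, false)
  origin - st.2.1.length

-- ===== PORT B =====
-- the for-loop of Source B: running total, count, early break when total exceeds budget
def solLoopB : List Int → Int → Int → Int → Int
  | [], _, _, cnt => cnt
  | x :: xs, total, budget, cnt =>
    let t := total + x
    if t > budget then cnt else solLoopB xs t budget (cnt + 1)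

def solution_alt (d : List Int) (budget : Int) : Int :=
  solLoopB (PySem.List.sorted d (fun x => x) false) 0 budget 0

-- ===== PRECONDITION & SPEC =====
def Spec_solution (d : List Int) (budget : Int) (out : Int) : Prop := out = solution_alt d budget
instance (d : List Int) (budget : Int) (out : Int) : Decidable (Spec_solution d budget out) := by unfold Spec_solution; infer_instance

-- ===== CLAIM (what is proved, stated in full; the proofs are below) =====
def Claim_equal_solution : Prop := ∀ (d : List Int) (budget : Int), Dom_solution d budget → Spec_solution d budget (solution d budget)

-- ===== LEMMAS AND PROOFS =====

-- abstract count of B's loop: remaining-budget form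
def countB : List Int → Int → Int
  | [], _ => 0
  | x :: xs, b => if x > b then 0 else 1 + countB xs (b - x)

theorem solLoopB_eq_countB : ∀ (s : List Int) (total budget cnt : Int),
    solLoopB s total budget cnt = cnt + countB s (budget - total) := by
  intro s
  induction s with
  | nil => intro total budget cnt; simp [solLoopB, countB]
  | cons x xs ih =>
    intro total budget cnt
    simp only [solLoopB, countB]
    by_cases h : total + x > budget
    · rw [if_pos h, if_pos (by omega)]; omega
    · rw [if_neg h, if_neg (by omega), ih]
      rw [show budget - (total + x) = budget - total - x from by ring]
      ring

-- B's count is never negative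
theorem countB_nonneg : ∀ (s : List Int) (b : Int), 0 ≤ countB s b := by
  intro s
  induction s with
  | nil => intro b; simp [countB]
  | cons x xs ih =>
    intro b
    simp only [countB]
    split_ifs with h
    · omega
    · have := ih (b - x); omega

-- once stopped, A's fold never changes state
theorem foldA_stopped : ∀ (s : List Int) (b : Int) (ds : List Int),
    s.foldl solStepA (b, ds, true) = (b, ds, true) := by
  intro s
  induction s with
  | nil => intro b ds; rfl
  | cons x xs ih => intro b ds; simp [List.foldl, solStepA, ih]

-- main invariant: if s is contained in ds as a multiset, the fold removes exactly countB s b elements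
theorem foldA_length : ∀ (s : List Int) (b : Int) (ds : List Int),
    (∀ a : Int, s.count a ≤ ds.count a) →
    ((s.foldl solStepA (b, ds, false)).2.1.length : Int) = (ds.length : Int) - countB s b := by
  intro s
  induction s with
  | nil => intro b ds _; simp [countB]
  | cons x xs ih =>
    intro b ds hcnt
    have hx : x ∈ ds := by
      have := hcnt x
      simp at this
      exact List.count_pos_iff.mp (by omega)
    simp only [List.foldl, solStepA, Bool.false_eq_true, if_false]
    by_cases hb : b - x < 0
    · rw [if_pos hb, foldA_stopped]
      have : countB (x :: xs) b = 0 := by simp [countB]; omega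
      simp [this]
    · rw [if_neg hb]
      rw [PySem.List.remove?_eq_some_erase ds x hx]
      simp only [Option.getD_some]
      have hcnt' : ∀ a : Int, xs.count a ≤ (ds.erase x).count a := by
        intro a
        rw [List.count_erase]
        have := hcnt a
        by_cases hax : a = x
        · subst hax; simp at this ⊢; omega
        · simp [Ne.symm hax] at this ⊢; omega
      rw [ih (b - x) (ds.erase x) hcnt']
      have hlen : (ds.erase x).length = ds.length - 1 := List.length_erase_of_mem hx
      have hpos : 0 < ds.length := List.length_pos_of_mem hx
      have : countB (x :: xs) b = 1 + countB xs (b - x) := by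
        simp [countB]; omega
      rw [this, hlen]
      omega

-- ===== VERDICT (by name: the statement is the Claim_ definition above) =====
theorem solution_spec : Claim_equal_solution := by
  intro d budget _
  unfold Spec_solution solution solution_alt
  have hperm : (PySem.List.sorted d (fun x => x) false).Perm d := PySem.List.sorted_perm d (fun x => x) false
  have hcnt : ∀ a : Int, (PySem.List.sorted d (fun x => x) false).count a ≤ d.count a := by
    intro a; rw [hperm.count_eq]
  rw [solLoopB_eq_countB]
  simp only [zero_add, sub_zero]
  have := foldA_length (PySem.List.sorted d (fun x => x) false) budget d hcnt
  simp only [this]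
  have hle := countB_nonneg (PySem.List.sorted d (fun x => x) false) budget
  omega
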